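-- pv_equiv track=rewrite | github.com/websitemoilap/PYTHON-PTIT | PY01027.py | check
-- ===== SOURCE A (Python) =====
-- def check(n):
--     cnt = 0
--     for i in n:
--         if i != '6' and i!= '8':
--             return "NO"
--         if i == '8': cnt += 1
--         else: cnt = 0
--         if cnt == 3: return "NO"
--     return "YES"
-- ===== SOURCE B (Python) =====
-- def check(n):
--     return "YES" if all(c in '68' for c in n) and '888' not in n else "NO"
-- ===== Notes on version B (the rewrite author's own statement) =====
-- stated objective: idiomatic
-- what changed: Replaced the stateful counter scan with two independent declarative checks: all characters in {'6','8'} and no '888' substring.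
import Mathlib
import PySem

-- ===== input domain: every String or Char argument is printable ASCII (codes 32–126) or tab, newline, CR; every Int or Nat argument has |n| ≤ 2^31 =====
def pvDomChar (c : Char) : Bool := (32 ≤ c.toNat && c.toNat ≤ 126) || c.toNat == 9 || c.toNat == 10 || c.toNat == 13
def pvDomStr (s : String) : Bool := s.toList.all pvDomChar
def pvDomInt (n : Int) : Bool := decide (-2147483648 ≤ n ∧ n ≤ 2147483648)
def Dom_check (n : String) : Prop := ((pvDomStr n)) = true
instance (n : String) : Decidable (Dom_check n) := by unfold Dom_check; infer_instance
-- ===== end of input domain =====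

-- B replaces A's stateful counter scan by two independent checks (all chars in '68', no '888' substring); return values proved equal for all strings.

-- ===== PORT A =====
-- A's for-loop over the characters with the running counter cnt, early returns kept as branches.
def checkLoop : List Char → Int → String
  | [], _ => "YES"
  | c :: rest, cnt =>
    if c ≠ '6' ∧ c ≠ '8' then "NO"
    else
      let cnt' : Int := if c = '8' then cnt + 1 else 0
      if cnt' = 3 then "NO" else checkLoop rest cnt'

def check (n : String) : String := checkLoop n.toList 0

-- ===== PORT B =====
-- all(c in '68' for c in n) and '888' not in n
def check_alt (n : String) : String :=
  if n.toList.all (fun c => PySem.Chars.isIn [c] "68".toList) && !(PySem.Str.isIn "888" n)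
  then "YES" else "NO"

-- ===== PRECONDITION & SPEC =====
def Spec_check (n : String) (out : String) : Prop := out = check_alt n
instance (n : String) (out : String) : Decidable (Spec_check n out) := by unfold Spec_check; infer_instance

-- ===== CLAIM (what is proved, stated in full; the proofs are below) =====
def Claim_equal_check : Prop := ∀ (n : String), Dom_check n → Spec_check n (check n)

-- ===== LEMMAS AND PROOFS =====

-- membership of a single character: [c] in "68" iff c is '6' or '8'
lemma isIn_single_68 (c : Char) :
    PySem.Chars.isIn [c] ['6', '8'] = (c == '6' || c == '8') := by
  by_cases h6 : c = '6'
  · subst h6; decide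
  · by_cases h8 : c = '8'
    · subst h8; decide
    · have hni : ¬ ([c] <:+: ['6', '8']) := by
        intro h
        have := h.subset (List.mem_singleton_self c)
        simp at this
        tauto
      rw [show (c == '6' || c == '8') = false by simp [h6, h8]]
      exact (PySem.Chars.isIn_eq_false_iff _ _).mpr hni

-- '888' never starts at a character that is not '8'
lemma isIn888_cons (c : Char) (hc : c ≠ '8') (l : List Char) :
    PySem.Chars.isIn ['8', '8', '8'] (c :: l) = PySem.Chars.isIn ['8', '8', '8'] l := by
  by_cases h : ['8', '8', '8'] <:+: l
  · rw [(PySem.Chars.isIn_iff_infix _ _).mpr h,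
        (PySem.Chars.isIn_iff_infix _ _).mpr (List.infix_cons h)]
  · rw [(PySem.Chars.isIn_eq_false_iff _ _).mpr h, (PySem.Chars.isIn_eq_false_iff _ _).mpr]
    intro hin
    rcases List.infix_cons_iff.mp hin with hpre | hinf
    · rcases List.cons_prefix_cons.mp hpre with ⟨h8, _⟩
      exact hc h8.symm
    · exact h hinf

-- '888' never starts at an '8' whose successor is not '8'
lemma isIn888_eight_cons (c : Char) (hc : c ≠ '8') (l : List Char) :
    PySem.Chars.isIn ['8', '8', '8'] ('8' :: c :: l) = PySem.Chars.isIn ['8', '8', '8'] (c :: l) := by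
  by_cases h : ['8', '8', '8'] <:+: (c :: l)
  · rw [(PySem.Chars.isIn_iff_infix _ _).mpr h,
        (PySem.Chars.isIn_iff_infix _ _).mpr (List.infix_cons h)]
  · rw [(PySem.Chars.isIn_eq_false_iff _ _).mpr h, (PySem.Chars.isIn_eq_false_iff _ _).mpr]
    intro hin
    rcases List.infix_cons_iff.mp hin with hpre | hinf
    · rcases List.cons_prefix_cons.mp hpre with ⟨_, hpre2⟩
      rcases List.cons_prefix_cons.mp hpre2 with ⟨h8, _⟩
      exact hc h8.symm
    · exact h hinf

-- '888' never starts at '8','8' followed by a non-'8'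
lemma isIn888_88_cons (c : Char) (hc : c ≠ '8') (l : List Char) :
    PySem.Chars.isIn ['8', '8', '8'] ('8' :: '8' :: c :: l)
      = PySem.Chars.isIn ['8', '8', '8'] ('8' :: c :: l) := by
  by_cases h : ['8', '8', '8'] <:+: ('8' :: c :: l)
  · rw [(PySem.Chars.isIn_iff_infix _ _).mpr h,
        (PySem.Chars.isIn_iff_infix _ _).mpr (List.infix_cons h)]
  · rw [(PySem.Chars.isIn_eq_false_iff _ _).mpr h, (PySem.Chars.isIn_eq_false_iff _ _).mpr]
    intro hin
    rcases List.infix_cons_iff.mp hin with hpre | hinf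
    · rcases List.cons_prefix_cons.mp hpre with ⟨_, hpre2⟩
      rcases List.cons_prefix_cons.mp hpre2 with ⟨_, hpre3⟩
      rcases List.cons_prefix_cons.mp hpre3 with ⟨h8, _⟩
      exact hc h8.symm
    · exact h hinf

-- main invariant: the loop with cnt trailing eights of credit answers YES iff
-- all chars are 6/8 and (that credit ++ rest) contains no run '888'
lemma checkLoop_char : ∀ (l : List Char) (cnt : Nat), cnt ≤ 2 →
    checkLoop l (cnt : Int) =
      if (l.all (fun c => c == '6' || c == '8'))
         && !(PySem.Chars.isIn ['8', '8', '8'] (List.replicate cnt '8' ++ l))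
      then "YES" else "NO" := by
  intro l
  induction l with
  | nil =>
    intro cnt hcnt
    interval_cases cnt <;> simp [checkLoop] <;> decide
  | cons c rest ih =>
    intro cnt hcnt
    by_cases h6 : c = '6'
    · subst h6
      have h68 : ('6' : Char) ≠ '8' := by decide
      have heq : PySem.Chars.isIn ['8', '8', '8'] (List.replicate cnt '8' ++ '6' :: rest)
          = PySem.Chars.isIn ['8', '8', '8'] rest := by
        interval_cases cnt
        · simpa using isIn888_cons '6' h68 rest
        · simp only [List.replicate, List.cons_append, List.nil_append]
          rw [isIn888_eight_cons '6' h68 rest, isIn888_cons '6' h68 rest]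
        · simp only [List.replicate, List.cons_append, List.nil_append]
          rw [isIn888_88_cons '6' h68 rest, isIn888_eight_cons '6' h68 rest,
              isIn888_cons '6' h68 rest]
      rw [show checkLoop ('6' :: rest) (cnt : Int) = checkLoop rest ((0 : Nat) : Int) by
            simp [checkLoop]]
      rw [ih 0 (by omega), heq]
      simp
    · by_cases h8 : c = '8'
      · subst h8
        have hlist : List.replicate cnt '8' ++ '8' :: rest
            = List.replicate (cnt + 1) '8' ++ rest := by
          rw [List.replicate_succ' (n := cnt)]; simp
        by_cases h2 : cnt = 2
        · subst h2
          rw [show checkLoop ('8' :: rest) ((2 : Nat) : Int) = "NO" by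
                simp [checkLoop]]
          have : PySem.Chars.isIn ['8', '8', '8'] (List.replicate 2 '8' ++ '8' :: rest) = true :=
            (PySem.Chars.isIn_iff_infix _ _).mpr ⟨[], rest, rfl⟩
          rw [this]; simp
        · have hstep : checkLoop ('8' :: rest) ((cnt : Nat) : Int)
              = checkLoop rest (((cnt + 1 : Nat) : Nat) : Int) := by
            have hne : ((cnt : Int) + 1) ≠ 3 := by omega
            simp [checkLoop, hne]
          rw [hstep, ih (cnt + 1) (by omega), hlist]
          simp
      · rw [show checkLoop (c :: rest) (cnt : Int) = "NO" by simp [checkLoop, h6, h8]]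
        simp [h6, h8]

-- ===== VERDICT (by name: the statement is the Claim_ definition above) =====
theorem check_spec : Claim_equal_check := by
  intro n _
  show check n = check_alt n
  rw [check, check_alt]
  have h := checkLoop_char n.toList 0 (by omega)
  simp only [List.replicate, List.nil_append, Nat.cast_zero] at h
  rw [h]
  have hall : (n.toList.all fun c => PySem.Chars.isIn [c] "68".toList)
      = (n.toList.all fun c => c == '6' || c == '8') := by
    have hf : (fun c => PySem.Chars.isIn [c] "68".toList) = (fun c => c == '6' || c == '8') :=
      funext fun c => by rw [show "68".toList = ['6', '8'] from rfl, isIn_single_68]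
    rw [hf]
  rw [hall, show PySem.Str.isIn "888" n = PySem.Chars.isIn ['8','8','8'] n.toList by
        simp [PySem.Str.isIn_eq]]
  rfl
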